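-- pv_equiv track=rewrite | github.com/maxeozakh/aoc_2023 | 7/main.py | is_x_k
-- ===== SOURCE A (Python) =====
-- def is_x_k(h, x):
--     for symbol in h:
--         counter = 0
--         for c in h:
--             if (c is symbol or c is 'J'):
--                 counter += 1
--
--         if (counter == x):
--             return True
--
--     return False
-- ===== SOURCE B (Python) =====
-- def is_x_k(h, x):
--     counts = {}
--     for c in h:
--         counts[c] = counts.get(c, 0) + 1
--     j = counts.get('J', 0)
--     for sym, n in counts.items():
--         if (n if sym == 'J' else n + j) == x:
--             return True
--     return False
-- ===== Notes on version B (the rewrite author's own statement) =====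
-- stated objective: faster
-- what changed: B builds the character frequency table once in a single pass and then tests each distinct symbol against the precomputed joker count, replacing A's nested rescan of the whole hand for every character.
import Mathlib
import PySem

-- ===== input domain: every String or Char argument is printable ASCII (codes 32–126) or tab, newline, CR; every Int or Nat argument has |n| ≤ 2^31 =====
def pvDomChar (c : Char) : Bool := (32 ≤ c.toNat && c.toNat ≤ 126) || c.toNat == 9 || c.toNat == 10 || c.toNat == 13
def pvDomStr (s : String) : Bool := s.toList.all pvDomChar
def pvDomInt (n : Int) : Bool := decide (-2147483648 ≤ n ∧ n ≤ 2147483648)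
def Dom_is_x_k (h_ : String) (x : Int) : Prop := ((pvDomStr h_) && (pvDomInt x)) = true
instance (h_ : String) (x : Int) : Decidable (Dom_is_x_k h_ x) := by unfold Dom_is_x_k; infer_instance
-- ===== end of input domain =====

-- B replaces A's quadratic rescan (count each character against the whole hand again) by one
-- frequency table built in a single pass plus a scan over its distinct entries (objective: faster).

-- ===== PORT A =====
-- outer 'for symbol in h' with early return; inner 'for c in h' counting loop
def pvLoopA (l : List Char) (x : Int) : List Char → Bool
  | [] => false
  | s :: rest =>
      let counter := l.foldl (fun acc c => if c == s || c == 'J' then acc + 1 else acc) (0 : Int)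
      if counter == x then true else pvLoopA l x rest

def is_x_k (h_ : String) (x : Int) : Bool := pvLoopA h_.toList x h_.toList

-- ===== PORT B =====
def is_x_k_alt (h_ : String) (x : Int) : Bool :=
  let counts := h_.toList.foldl (fun d c => d.insert c (d.getD c 0 + 1)) (PySem.Dict.empty : PySem.Dict Char Int)
  let j := counts.getD 'J' 0
  counts.items.any (fun p => (if p.1 == 'J' then p.2 else p.2 + j) == x)

-- ===== PRECONDITION & SPEC =====
def Spec_is_x_k (h_ : String) (x : Int) (out : Bool) : Prop := out = is_x_k_alt h_ x
instance (h_ : String) (x : Int) (out : Bool) : Decidable (Spec_is_x_k h_ x out) := by unfold Spec_is_x_k; infer_instance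

-- ===== CLAIM (what is proved, stated in full; the proofs are below) =====
def Claim_equal_is_x_k : Prop := ∀ (h_ : String) (x : Int), Dom_is_x_k h_ x → Spec_is_x_k h_ x (is_x_k h_ x)

-- ===== LEMMAS AND PROOFS =====

-- A's outer loop is an 'any' over the hand's characters
theorem pvLoopA_eq_any (l : List Char) (x : Int) (syms : List Char) :
    pvLoopA l x syms =
      syms.any (fun s => ((l.countP (fun c => c == s || c == 'J') : Int) == x)) := by
  induction syms with
  | nil => simp [pvLoopA]
  | cons s rest ih =>
      simp only [pvLoopA, PySem.List.foldl_if_add_one, List.any_cons, ← ih]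
      simp only [zero_add]
      split_ifs with hx
      · simp only [beq_iff_eq] at hx
        simp [hx]
      · simp only [beq_iff_eq] at hx
        simp [hx]

-- the disjunctive count of A splits into symbol count + joker count
theorem pvCountP_split (l : List Char) (s : Char) :
    l.countP (fun c => c == s || c == 'J') =
      if s = 'J' then l.count 'J' else l.count s + l.count 'J' := by
  split_ifs with hs
  · subst hs; simp [List.count]
  · induction l with
    | nil => simp
    | cons c t ih =>
        by_cases h1 : c = s <;> by_cases h2 : c = 'J' <;>
          simp_all [List.count_cons, Ne.symm hs] <;> omega

-- ===== VERDICT (by name: the statement is the Claim_ definition above) =====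
theorem is_x_k_spec : Claim_equal_is_x_k := by
  intro h_ x _
  unfold Spec_is_x_k is_x_k is_x_k_alt
  simp only [pvLoopA_eq_any, PySem.Dict.foldl_insert_getD_add_one_eq_counter,
    PySem.Dict.items_counter, PySem.Dict.getD_counter]
  rw [Bool.eq_iff_iff]
  simp only [List.any_eq_true, List.any_map, Function.comp]
  constructor
  · rintro ⟨s, hs, hp⟩
    refine ⟨s, ((PySem.Set.mem_ofList _ _).mpr hs), ?_⟩
    rw [pvCountP_split] at hp
    by_cases h : s = 'J' <;> simp_all
  · rintro ⟨s, hs, hp⟩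
    refine ⟨s, ((PySem.Set.mem_ofList _ _).mp hs), ?_⟩
    rw [pvCountP_split]
    by_cases h : s = 'J' <;> simp_all
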